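-- pv_equiv track=rewrite | github.com/rafaelcalai/docker_swarm_controller | app/rt_cluster_scheduler.py | available_worker_node
-- ===== SOURCE A (Python) =====
-- def available_worker_node(available_worker_nodes, services_associated, service_limit):
--     least_work_node = ""
--     max_services_associated = 255
--     for node in available_worker_nodes:
--         if node not in services_associated:
--             least_work_node = node
--             break
--         else:
--             if (
--                 len(services_associated[node]) < max_services_associated
--                 and len(services_associated[node]) < service_limit[node]
--             ):
--                 least_work_node = node
--                 max_services_associated = len(services_associated[node])
--     return least_work_node
-- ===== SOURCE B (Python) =====
-- def available_worker_node(available_worker_nodes, services_associated, service_limit):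
--     # pass 1: first node with no associated services at all wins immediately
--     for node in available_worker_nodes:
--         if node not in services_associated:
--             return node
--     # pass 2: among nodes under the 255 cap and under their per-node limit
--     # (a node with no known limit gets no capacity), pick the earliest node
--     # with the fewest associated services
--     candidates = [
--         node
--         for node in available_worker_nodes
--         if len(services_associated[node]) < 255
--         and len(services_associated[node]) < service_limit.get(node, 0)
--     ]
--     if not candidates:
--         return ""
--     best = candidates[0]
--     for node in candidates[1:]:
--         if len(services_associated[node]) < len(services_associated[best]):
--             best = node
--     return best
-- ===== Notes on version B (the rewrite author's own statement) =====
-- stated objective: alternative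
-- what changed: A's single accumulator loop with a running 255-capped minimum and a break is replaced by two differently-shaped passes: an early-return scan for the first node missing from services_associated, then a filter building the list of qualifying nodes (count<255 and count<limit, with a missing limit granting no capacity) followed by an earliest-minimum selection over that list.
import Mathlib
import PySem

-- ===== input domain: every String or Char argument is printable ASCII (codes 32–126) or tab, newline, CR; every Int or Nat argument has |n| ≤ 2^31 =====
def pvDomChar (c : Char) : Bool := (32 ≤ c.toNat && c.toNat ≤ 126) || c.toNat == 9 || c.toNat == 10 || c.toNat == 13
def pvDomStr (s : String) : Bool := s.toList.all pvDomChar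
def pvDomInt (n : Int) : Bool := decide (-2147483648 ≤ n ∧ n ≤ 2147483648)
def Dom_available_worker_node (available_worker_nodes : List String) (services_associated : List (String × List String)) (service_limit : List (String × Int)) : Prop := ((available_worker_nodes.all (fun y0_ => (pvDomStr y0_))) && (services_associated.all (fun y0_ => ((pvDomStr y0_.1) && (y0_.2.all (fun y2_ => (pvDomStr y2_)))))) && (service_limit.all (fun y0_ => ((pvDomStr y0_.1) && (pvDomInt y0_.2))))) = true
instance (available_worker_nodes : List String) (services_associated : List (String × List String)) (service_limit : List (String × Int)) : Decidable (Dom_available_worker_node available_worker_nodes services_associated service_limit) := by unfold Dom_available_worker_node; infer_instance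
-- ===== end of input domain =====

-- B replaces A's single running-minimum loop by two passes (first-missing scan, then filter + earliest-minimum); same cost, different decomposition; equivalence is about the return value only.

-- ===== PORT A =====
-- A's loop: state (least_work_node, max_services_associated); break on a node
-- missing from services_associated; `and` short-circuits, so service_limit is
-- only looked up when the count is below the running minimum.
def awnGoA (sa : PySem.Dict String (List String)) (sl : PySem.Dict String Int)
    (least : String) (maxv : Int) : List String → String
  | [] => least
  | n :: rest =>
    match sa.get? n with
    | none => n
    | some svcs =>
      if (svcs.length : Int) < maxv then
        match sl.get? n with
        | none => ""  -- Python raises KeyError here; Pre_ excludes these inputs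
        | some lim =>
          if (svcs.length : Int) < lim then
            awnGoA sa sl n (svcs.length : Int) rest
          else
            awnGoA sa sl least maxv rest
      else
        awnGoA sa sl least maxv rest

def available_worker_node (available_worker_nodes : List String) (services_associated : List (String × List String)) (service_limit : List (String × Int)) : String :=
  awnGoA (PySem.Dict.mk services_associated) (PySem.Dict.mk service_limit) "" 255 available_worker_nodes

-- ===== PORT B =====
def awnLen (sa : PySem.Dict String (List String)) (n : String) : Int :=
  ((sa.getD n []).length : Int)

-- pass 1: first node not in services_associated
def awnFirstMissing (sa : PySem.Dict String (List String)) : List String → Option String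
  | [] => none
  | n :: rest => if (sa.get? n).isSome then awnFirstMissing sa rest else some n

-- pass 2's min loop: earliest node with the fewest associated services
def awnBMin (sa : PySem.Dict String (List String)) (best : String) : List String → String
  | [] => best
  | n :: rest =>
    if awnLen sa n < awnLen sa best then awnBMin sa n rest else awnBMin sa best rest

def available_worker_node_alt (available_worker_nodes : List String) (services_associated : List (String × List String)) (service_limit : List (String × Int)) : String :=
  let sa := PySem.Dict.mk services_associated
  let sl := PySem.Dict.mk service_limit
  match awnFirstMissing sa available_worker_nodes with
  | some n => n
  | none =>
    match available_worker_nodes.filter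
        (fun n => decide (awnLen sa n < 255) && decide (awnLen sa n < sl.getD n 0)) with
    | [] => ""
    | c :: cs => awnBMin sa c cs

-- ===== PRECONDITION & SPEC =====
-- helper for Pre_: a node counts toward the running minimum iff it has a limit and is under it
def awnElig (sa : PySem.Dict String (List String)) (sl : PySem.Dict String Int) (n : String) : Bool :=
  match sl.get? n with
  | none => false
  | some lim => decide (awnLen sa n < lim)

-- helper for Pre_: the value of A's running minimum after a prefix (min over eligible counts, capped at 255)
def awnThresh (sa : PySem.Dict String (List String)) (sl : PySem.Dict String Int) (pref : List String) : Int :=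
  ((pref.filter (awnElig sa sl)).map (awnLen sa)).foldr min 255

-- Pre_ excludes exactly the inputs on which the Python A raises KeyError: some node,
-- preceded only by nodes present in services_associated, is absent from service_limit
-- while its service count is below A's running minimum at that point.
def Pre_available_worker_node (available_worker_nodes : List String) (services_associated : List (String × List String)) (service_limit : List (String × Int)) : Prop :=
  ∀ i, i < available_worker_nodes.length →
    ((available_worker_nodes.take (i+1)).all
        (fun n => ((PySem.Dict.mk services_associated).get? n).isSome)) = true →
    ((PySem.Dict.mk service_limit).get? (available_worker_nodes.getD i "")).isNone = true →
    ¬ (awnLen (PySem.Dict.mk services_associated) (available_worker_nodes.getD i "") <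
        awnThresh (PySem.Dict.mk services_associated) (PySem.Dict.mk service_limit)
          (available_worker_nodes.take i))
instance (available_worker_nodes : List String) (services_associated : List (String × List String)) (service_limit : List (String × Int)) : Decidable (Pre_available_worker_node available_worker_nodes services_associated service_limit) := by unfold Pre_available_worker_node; infer_instance

def pvWitness_available_worker_node : List String × (List (String × List String)) × (List (String × Int)) :=
  (["n1", "n2"], [("n1", ["s1"])], [("n1", 5)])

def Spec_available_worker_node (available_worker_nodes : List String) (services_associated : List (String × List String)) (service_limit : List (String × Int)) (out : String) : Prop := out = available_worker_node_alt available_worker_nodes services_associated service_limit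
instance (available_worker_nodes : List String) (services_associated : List (String × List String)) (service_limit : List (String × Int)) (out : String) : Decidable (Spec_available_worker_node available_worker_nodes services_associated service_limit out) := by unfold Spec_available_worker_node; infer_instance

-- ===== CLAIM (what is proved, stated in full; the proofs are below) =====
def Claim_equal_available_worker_node : Prop := ∀ (available_worker_nodes : List String) (services_associated : List (String × List String)) (service_limit : List (String × Int)), Dom_available_worker_node available_worker_nodes services_associated service_limit → Pre_available_worker_node available_worker_nodes services_associated service_limit → Spec_available_worker_node available_worker_nodes services_associated service_limit (available_worker_node available_worker_nodes services_associated service_limit)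


-- ===== LEMMAS AND PROOFS =====

theorem awnThresh_nil (sa : PySem.Dict String (List String)) (sl : PySem.Dict String Int) :
    awnThresh sa sl [] = 255 := rfl

theorem awnThresh_cons (sa : PySem.Dict String (List String)) (sl : PySem.Dict String Int)
    (x : String) (p : List String) :
    awnThresh sa sl (x :: p) =
      if awnElig sa sl x then min (awnLen sa x) (awnThresh sa sl p) else awnThresh sa sl p := by
  simp only [awnThresh, List.filter_cons]
  split_ifs with h <;> simp

theorem awnThresh_le (sa : PySem.Dict String (List String)) (sl : PySem.Dict String Int)
    (p : List String) : awnThresh sa sl p ≤ 255 := by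
  induction p with
  | nil => simp [awnThresh_nil]
  | cons x rest ih =>
    rw [awnThresh_cons]
    split_ifs with h
    · exact le_trans (min_le_right _ _) ih
    · exact ih

-- predicate used by the invariant: no KeyError happens while scanning `nodes` with running minimum `maxv`
def awnSafe (sa : PySem.Dict String (List String)) (sl : PySem.Dict String Int)
    (maxv : Int) (nodes : List String) : Prop :=
  ∀ p x s, nodes = p ++ x :: s → (∀ m ∈ p ++ [x], (sa.get? m).isSome) →
    (sl.get? x).isNone = true →
    ¬ (awnLen sa x < min maxv (awnThresh sa sl p))

theorem awnSafe_tail (sa : PySem.Dict String (List String)) (sl : PySem.Dict String Int)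
    {maxv maxv' : Int} {x : String} {rest : List String}
    (hxsa : (sa.get? x).isSome)
    (h : awnSafe sa sl maxv (x :: rest))
    (hm : ∀ p : List String, min maxv' (awnThresh sa sl p) = min maxv (awnThresh sa sl (x :: p))) :
    awnSafe sa sl maxv' rest := by
  intro p y s hps hall hnone
  rw [hm p]
  refine h (x :: p) y s (by simp [hps]) ?_ hnone
  intro m hmm
  rcases List.mem_append.mp hmm with hmm | hmm
  · rcases List.mem_cons.mp hmm with rfl | hmm
    · exact hxsa
    · exact hall m (List.mem_append.mpr (Or.inl hmm))
  · exact hall m (List.mem_append.mpr (Or.inr hmm))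

-- the min loop ignores candidates whose length is not below the current best
theorem awnBMin_cap (sa : PySem.Dict String (List String)) (q : String → Bool) :
    ∀ (l : List String) (best : String) (m : Int), awnLen sa best ≤ m →
      awnBMin sa best (l.filter (fun x => decide (awnLen sa x < m) && q x))
        = awnBMin sa best (l.filter (fun x => decide (awnLen sa x < awnLen sa best) && q x)) := by
  intro l
  induction l with
  | nil => intro best m _; rfl
  | cons x rest ih =>
    intro best m hbm
    by_cases hq : q x = true
    · by_cases hlt : awnLen sa x < awnLen sa best
      · have hm : awnLen sa x < m := lt_of_lt_of_le hlt hbm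
        simp only [List.filter_cons, hq, hlt, hm, decide_true, Bool.and_true, if_pos, awnBMin]
        rw [ih x m (le_of_lt hm), ← ih x (awnLen sa best) (le_of_lt hlt)]
      · by_cases hm : awnLen sa x < m
        · simp only [List.filter_cons, hq, hlt, hm, decide_true, decide_false, Bool.and_true,
            if_pos, if_neg, awnBMin, Bool.false_eq_true, not_false_iff]
          exact ih best m hbm
        · simp only [List.filter_cons, hq, hlt, hm, decide_false, Bool.and_true,
            Bool.false_eq_true, if_neg, not_false_iff]
          exact ih best m hbm
    · have hq' : q x = false := by simpa using hq
      simp only [List.filter_cons, hq', Bool.and_false, Bool.false_eq_true, if_neg,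
        not_false_iff]
      exact ih best m hbm

-- if some node is missing from services_associated and no KeyError comes first,
-- A's loop returns the first missing node regardless of state
theorem awnGoA_firstMissing (sa : PySem.Dict String (List String)) (sl : PySem.Dict String Int)
    (nodes : List String) (n : String) :
    ∀ (least : String) (maxv : Int), maxv ≤ 255 → awnSafe sa sl maxv nodes →
      awnFirstMissing sa nodes = some n →
      awnGoA sa sl least maxv nodes = n := by
  induction nodes with
  | nil => intro least maxv _ _ h; simp [awnFirstMissing] at h
  | cons x rest ih =>
    intro least maxv h255 hsafe h
    simp only [awnFirstMissing] at h
    by_cases hx : (sa.get? x).isSome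
    · simp only [hx, if_pos] at h
      cases hget : sa.get? x with
      | none => simp [hget] at hx
      | some svcs =>
        have hlen : awnLen sa x = (svcs.length : Int) := by
          simp [awnLen, PySem.Dict.getD_eq_get?_getD, hget]
        simp only [awnGoA, hget]
        split_ifs with hc
        · cases hsl : sl.get? x with
          | none =>
            exact absurd (by rw [hlen]; simpa [awnThresh_nil, min_eq_left h255] using hc)
              (hsafe [] x rest rfl (by simpa using hx) (by simp [hsl]))
          | some lim =>
            simp only
            split_ifs with hlim
            · refine ih x (svcs.length : Int) (le_of_lt (lt_of_lt_of_le hc h255))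
                (awnSafe_tail sa sl hx hsafe ?_) h
              intro p
              rw [awnThresh_cons]
              have he : awnElig sa sl x = true := by simp [awnElig, hsl, hlen, hlim]
              rw [he, if_pos rfl, hlen]
              omega
            · refine ih least maxv h255 (awnSafe_tail sa sl hx hsafe ?_) h
              intro p
              rw [awnThresh_cons]
              have he : awnElig sa sl x = false := by simp [awnElig, hsl, hlen, hlim]
              rw [he]; simp
        · refine ih least maxv h255 (awnSafe_tail sa sl hx hsafe ?_) h
          intro p
          rw [awnThresh_cons]
          by_cases he : awnElig sa sl x = true
          · rw [he, if_pos rfl]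
            have : maxv ≤ awnLen sa x := by rw [hlen]; omega
            omega
          · simp only [he]; simp
    · simp only [hx, Bool.false_eq_true, ite_false] at h
      cases hget : sa.get? x with
      | none =>
        simp only [awnGoA, hget]
        exact Option.some.inj h
      | some svcs => simp [hget] at hx

-- on an all-present list with no KeyError, A's loop is the earliest minimum over the filtered candidates
theorem awnGoA_allPresent (sa : PySem.Dict String (List String)) (sl : PySem.Dict String Int)
    (nodes : List String) :
    ∀ (least : String) (maxv : Int), maxv ≤ 255 →
      (∀ n ∈ nodes, (sa.get? n).isSome) → awnSafe sa sl maxv nodes →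
      awnGoA sa sl least maxv nodes =
        match nodes.filter (fun n => decide (awnLen sa n < maxv) &&
            decide (awnLen sa n < sl.getD n 0)) with
        | [] => least
        | c :: cs => awnBMin sa c cs := by
  induction nodes with
  | nil => intro least maxv _ _ _; rfl
  | cons x rest ih =>
    intro least maxv h255 hall hsafe
    have hx : (sa.get? x).isSome := hall x (by simp)
    cases hget : sa.get? x with
    | none => simp [hget] at hx
    | some svcs =>
      have hlen : awnLen sa x = (svcs.length : Int) := by
        simp [awnLen, PySem.Dict.getD_eq_get?_getD, hget]
      have hrest : ∀ n ∈ rest, (sa.get? n).isSome := fun n hn => hall n (by simp [hn])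
      simp only [awnGoA, hget]
      split_ifs with hc
      · -- count below the running minimum: service_limit is looked up
        cases hsl : sl.get? x with
        | none =>
          exact absurd (by rw [hlen]; simpa [awnThresh_nil, min_eq_left h255] using hc)
            (hsafe [] x rest rfl (by simpa using hx) (by simp [hsl]))
        | some lim =>
          have hgl : sl.getD x 0 = lim := by
            simp [PySem.Dict.getD_eq_get?_getD, hsl]
          simp only
          split_ifs with hlim
          · -- x qualifies and becomes the new best/threshold
            rw [ih x (svcs.length : Int) (le_of_lt (lt_of_lt_of_le hc h255)) hrest
              (awnSafe_tail sa sl hx hsafe (by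
                intro p
                rw [awnThresh_cons]
                have he : awnElig sa sl x = true := by simp [awnElig, hsl, hlen, hlim]
                rw [he, if_pos rfl, hlen]
                omega))]
            have hfx : (decide (awnLen sa x < maxv) && decide (awnLen sa x < sl.getD x 0)) = true := by
              simp [hlen, hgl, hc, hlim]
            simp only [List.filter_cons, hfx, if_pos]
            rw [awnBMin_cap sa (fun n => decide (awnLen sa n < sl.getD n 0)) rest x maxv
              (by rw [hlen]; exact le_of_lt hc)]
            rw [hlen]
            cases hf : rest.filter (fun n => decide (awnLen sa n < (svcs.length : Int)) &&
                decide (awnLen sa n < sl.getD n 0)) with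
            | nil => rfl
            | cons c cs =>
              have hcmem : c ∈ rest.filter (fun n => decide (awnLen sa n < (svcs.length : Int)) &&
                  decide (awnLen sa n < sl.getD n 0)) := by rw [hf]; simp
              have hclt : awnLen sa c < (svcs.length : Int) := by
                have := List.of_mem_filter hcmem
                simpa using (Bool.and_elim_left this : _)
              simp only [awnBMin, hlen, if_pos hclt]
          · -- x is at or over its limit: skipped
            rw [ih least maxv h255 hrest (awnSafe_tail sa sl hx hsafe (by
              intro p
              rw [awnThresh_cons]
              have he : awnElig sa sl x = false := by simp [awnElig, hsl, hlen, hlim]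
              rw [he]; simp))]
            have hfx : (decide (awnLen sa x < maxv) && decide (awnLen sa x < sl.getD x 0)) = false := by
              simp only [hlen, hgl]
              have : ¬ (svcs.length : Int) < lim := hlim
              simp [this]
            simp only [List.filter_cons, hfx, Bool.false_eq_true, if_neg, not_false_iff]
      · -- count at or above the running minimum: skipped without touching service_limit
        rw [ih least maxv h255 hrest (awnSafe_tail sa sl hx hsafe (by
          intro p
          rw [awnThresh_cons]
          by_cases he : awnElig sa sl x = true
          · rw [he, if_pos rfl]
            have : maxv ≤ awnLen sa x := by rw [hlen]; omega
            omega
          · simp only [he]; simp))]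
        have hfx : (decide (awnLen sa x < maxv) && decide (awnLen sa x < sl.getD x 0)) = false := by
          have : ¬ awnLen sa x < maxv := by rw [hlen]; exact hc
          simp [this]
        simp only [List.filter_cons, hfx, Bool.false_eq_true, if_neg, not_false_iff]

theorem awnFirstMissing_none (sa : PySem.Dict String (List String)) (nodes : List String)
    (h : awnFirstMissing sa nodes = none) : ∀ n ∈ nodes, (sa.get? n).isSome := by
  induction nodes with
  | nil => intro n hn; simp at hn
  | cons x rest ih =>
    intro n hn
    simp only [awnFirstMissing] at h
    by_cases hx : (sa.get? x).isSome
    · simp only [hx, if_pos] at h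
      rcases List.mem_cons.mp hn with rfl | hn'
      · exact hx
      · exact ih h n hn'
    · simp [hx] at h

-- Pre_ gives the split-form safety invariant at the initial state
theorem pre_safe (nodes : List String) (saL : List (String × List String))
    (slL : List (String × Int))
    (hpre : Pre_available_worker_node nodes saL slL) :
    awnSafe (PySem.Dict.mk saL) (PySem.Dict.mk slL) 255 nodes := by
  intro p x s hps hall hnone
  have hi : p.length < nodes.length := by
    subst hps; simp
  have htake : nodes.take p.length = p := by
    subst hps; exact List.take_left
  have hget : nodes.getD p.length "" = x := by
    subst hps
    simp [List.getD]
  have htake1 : nodes.take (p.length + 1) = p ++ [x] := by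
    subst hps
    rw [List.take_append]
    simp
  have hall' : ((nodes.take (p.length + 1)).all
      (fun n => ((PySem.Dict.mk saL).get? n).isSome)) = true := by
    rw [htake1, List.all_eq_true]
    intro m hm
    exact hall m hm
  have := hpre p.length hi hall' (by rw [hget]; exact hnone)
  rw [htake, hget] at this
  have hle := awnThresh_le (PySem.Dict.mk saL) (PySem.Dict.mk slL) p
  omega

-- ===== VERDICT (by name: the statements are the Claim_ definitions above) =====
theorem available_worker_node_spec : Claim_equal_available_worker_node := by
  intro nodes saL slL _ hpre
  unfold Spec_available_worker_node available_worker_node available_worker_node_alt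
  have hsafe := pre_safe nodes saL slL hpre
  cases hfm : awnFirstMissing (PySem.Dict.mk saL) nodes with
  | some n =>
    simp only [hfm]
    exact awnGoA_firstMissing _ _ nodes n "" 255 le_rfl hsafe hfm
  | none =>
    simp only [hfm]
    exact awnGoA_allPresent _ _ nodes "" 255 le_rfl
      (awnFirstMissing_none _ nodes hfm) hsafe
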